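-- pv_equiv track=rewrite | github.com/mynameisjanus/HackerRank | billboards.py | billboards
-- ===== SOURCE A (Python) =====
-- def billboards(k, revenue):
--     total = sum(revenue)
--     N = len(revenue)
--     if k == N:
--         return total
--     else:
--         x = revenue[: k + 1]
--
--         min_value = min(x)
--         min_index = x.index(min_value)
--
--         for i in range(k + 1, N):
--             if i - min_index >= k:
--                 min_value = min(x[i - (k + 1): i + 1])
--                 min_index = x.index(min_value)
--
--             x.append(min_value + revenue[i])
--
--             if x[i] < min_value:
--                 min_value = x[i]
--                 min_index = i
--
--         return total - min(x[N - (k + 1):])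
-- ===== SOURCE B (Python) =====
-- def billboards(k, revenue):
--     # Monotonic-queue sliding-window minimum over the removal-cost DP array: O(N).
--     total = sum(revenue)
--     N = len(revenue)
--     if k == N:
--         return total
--     x = []        # x[i] = min cost of removals up to i with billboard i removed
--     dq = []       # indices into x; dq[head:] is the live deque, x-values strictly increasing
--     head = 0      # front pointer (popleft = head += 1)
--     for i in range(N):
--         if i <= k:
--             v = revenue[i]
--         else:
--             while dq[head] < i - (k + 1):
--                 head += 1
--             v = x[dq[head]] + revenue[i]
--         while len(dq) > head and x[dq[-1]] >= v:
--             dq.pop()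
--         dq.append(i)
--         x.append(v)
--     return total - min(x[N - (k + 1):])
-- ===== Notes on version B (the rewrite author's own statement) =====
-- stated objective: faster
-- what changed: Replaces A's lazy min/index cache with repeated O(k) window rescans by a monotonic-deque sliding-window minimum over the DP cost array, one amortized O(1) step per billboard.
import Mathlib
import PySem

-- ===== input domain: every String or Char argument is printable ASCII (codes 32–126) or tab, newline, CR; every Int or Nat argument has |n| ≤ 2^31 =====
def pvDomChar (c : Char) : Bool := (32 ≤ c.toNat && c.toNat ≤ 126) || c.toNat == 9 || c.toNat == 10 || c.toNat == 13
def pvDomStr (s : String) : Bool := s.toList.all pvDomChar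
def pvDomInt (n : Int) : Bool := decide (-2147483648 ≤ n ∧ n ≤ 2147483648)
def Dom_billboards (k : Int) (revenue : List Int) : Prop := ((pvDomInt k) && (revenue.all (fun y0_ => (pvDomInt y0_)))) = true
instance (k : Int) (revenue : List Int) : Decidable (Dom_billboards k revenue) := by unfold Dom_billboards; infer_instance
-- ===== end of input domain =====

-- B replaces A's lazy min/index cache (with O(k) window rescans) by a monotonic-deque
-- sliding-window minimum over the same DP cost array; equivalence of return values is proved on Pre_.

-- ===== PORT A =====
def billboards (k : Int) (revenue : List Int) : Int :=
  let total := revenue.sum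
  let N : Int := (revenue.length : Int)
  if k = N then total
  else
    let x0 := PySem.List.slice revenue none (some (k + 1))
    let mv0 := (PySem.List.min? x0 (fun y => y)).getD 0
    let mi0 : Int := ((PySem.List.index? x0 mv0).getD 0 : Int)
    let st := (PySem.List.pyRange (k + 1) N 1).foldl
      (fun (st : List Int × Int × Int) i =>
        let x := st.1
        let mv := st.2.1
        let mi := st.2.2
        let mv' := if i - mi ≥ k then
            (PySem.List.min? (PySem.List.slice x (some (i - (k + 1))) (some (i + 1))) (fun y => y)).getD 0
          else mv
        let mi' : Int := if i - mi ≥ k then ((PySem.List.index? x mv').getD 0 : Int) else mi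
        let x' := x ++ [mv' + (PySem.List.pyGet? revenue i).getD 0]
        let xi := (PySem.List.pyGet? x' i).getD 0
        if xi < mv' then (x', xi, i) else (x', mv', mi'))
      (x0, mv0, mi0)
    total - (PySem.List.min? (PySem.List.slice st.1 (some (N - (k + 1))) none) (fun y => y)).getD 0

-- ===== PORT B =====
def billboards_alt (k : Int) (revenue : List Int) : Int :=
  let total := revenue.sum
  let N : Int := (revenue.length : Int)
  if k = N then total
  else
    let st := (PySem.List.pyRange 0 N 1).foldl
      (fun (st : List Int × List Int) i =>
        let x := st.1
        let dq := st.2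
        -- the Python 'head' pointer realises popleft; here the live deque dq[head:] is the list itself
        let vdq : Int × List Int :=
          if i ≤ k then ((PySem.List.pyGet? revenue i).getD 0, dq)
          else
            let dq := dq.dropWhile (fun j => decide (j < i - (k + 1)))
            ((PySem.List.pyGet? x (dq.headD 0)).getD 0 + (PySem.List.pyGet? revenue i).getD 0, dq)
        let v := vdq.1
        let dq := (vdq.2.reverse.dropWhile (fun j => decide ((PySem.List.pyGet? x j).getD 0 ≥ v))).reverse
        (x ++ [v], dq ++ [i]))
      ([], [])
    total - (PySem.List.min? (PySem.List.slice st.1 (some (N - (k + 1))) none) (fun y => y)).getD 0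

-- ===== PRECONDITION & SPEC =====
-- Pre_ excludes exactly the inputs where A raises: negative k (empty initial slice or negative
-- indexing makes min()/min of an empty slice raise) and empty revenue with k ≠ 0 (min([]) raises).
def Pre_billboards (k : Int) (revenue : List Int) : Prop := 0 ≤ k ∧ (revenue = [] → k = 0)
instance (k : Int) (revenue : List Int) : Decidable (Pre_billboards k revenue) := by unfold Pre_billboards; infer_instance
def pvWitness_billboards : Int × List Int := (1, [3, 2, 4, 1])
def Spec_billboards (k : Int) (revenue : List Int) (out : Int) : Prop := out = billboards_alt k revenue
instance (k : Int) (revenue : List Int) (out : Int) : Decidable (Spec_billboards k revenue out) := by unfold Spec_billboards; infer_instance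

-- ===== CLAIM (what is proved, stated in full; the proofs are below) =====
def Claim_equal_billboards : Prop := ∀ (k : Int) (revenue : List Int), Dom_billboards k revenue → Pre_billboards k revenue → Spec_billboards k revenue (billboards k revenue)

-- ===== LEMMAS AND PROOFS =====


-- canonical DP value: cval kn rev i = cost x[i] of the billboards DP
def cval (kn : Nat) (rev : List Int) (i : Nat) : Int :=
  if _h : i ≤ kn then rev.getD i 0
  else (((List.range kn).map (fun t => cval kn rev (i - 2 - t))).foldl min (cval kn rev (i - 1))) + rev.getD i 0
termination_by i
decreasing_by all_goals omega

def wmin (kn : Nat) (rev : List Int) (i : Nat) : Int :=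
  ((List.range kn).map (fun t => cval kn rev (i - 2 - t))).foldl min (cval kn rev (i - 1))

theorem cval_of_le {kn : Nat} {rev : List Int} {i : Nat} (h : i ≤ kn) :
    cval kn rev i = rev.getD i 0 := by rw [cval, dif_pos h]

theorem cval_of_gt {kn : Nat} {rev : List Int} {i : Nat} (h : kn < i) :
    cval kn rev i = wmin kn rev i + rev.getD i 0 := by
  rw [cval, dif_neg (by omega)]; rfl

theorem wmin_le {kn : Nat} {rev : List Int} {i j : Nat} (h : kn < i)
    (hj1 : i - 1 - kn ≤ j) (hj2 : j < i) : wmin kn rev i ≤ cval kn rev j := by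
  unfold wmin
  rcases eq_or_lt_of_le (Nat.le_sub_one_of_lt hj2) with he | hlt
  · rw [show j = i - 1 by omega]
    exact (PySem.List.foldl_min_le _ _).1
  · have ht : i - 2 - (i - 2 - j) = j := by omega
    have hm : cval kn rev j ∈ (List.range kn).map (fun t => cval kn rev (i - 2 - t)) := by
      refine List.mem_map.2 ⟨i - 2 - j, List.mem_range.2 (by omega), by rw [ht]⟩
    exact (PySem.List.foldl_min_le _ _).2 _ hm

theorem wmin_attained {kn : Nat} {rev : List Int} {i : Nat} (h : kn < i) :
    ∃ j, i - 1 - kn ≤ j ∧ j < i ∧ wmin kn rev i = cval kn rev j := by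
  unfold wmin
  rcases PySem.List.foldl_min_mem ((List.range kn).map (fun t => cval kn rev (i - 2 - t))) (cval kn rev (i - 1)) with he | hm
  · exact ⟨i - 1, by omega, by omega, he⟩
  · obtain ⟨t, ht, he⟩ := List.mem_map.1 hm
    have ht' := List.mem_range.1 ht
    exact ⟨i - 2 - t, by omega, by omega, he.symm⟩

theorem wmin_unique {kn : Nat} {rev : List Int} {i : Nat} (h : kn < i) {m : Int}
    (hub : ∀ j, i - 1 - kn ≤ j → j < i → m ≤ cval kn rev j)
    (hat : ∃ j, i - 1 - kn ≤ j ∧ j < i ∧ m = cval kn rev j) :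
    m = wmin kn rev i := by
  obtain ⟨q, hq1, hq2, hq3⟩ := hat
  obtain ⟨r, hr1, hr2, hr3⟩ := wmin_attained (rev := rev) h
  exact le_antisymm (hr3 ▸ hub r hr1 hr2) (hq3 ▸ wmin_le h hq1 hq2)

-- the canonical DP list prefix
def Xl (kn : Nat) (rev : List Int) (i : Nat) : List Int := (List.range i).map (cval kn rev)

theorem Xl_length (kn : Nat) (rev : List Int) (i : Nat) : (Xl kn rev i).length = i := by
  simp [Xl]

theorem Xl_getElem (kn : Nat) (rev : List Int) {i j : Nat} (h : j < i) :
    (Xl kn rev i)[j]'(by simp [Xl_length, h]) = cval kn rev j := by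
  simp [Xl]

theorem Xl_succ (kn : Nat) (rev : List Int) (i : Nat) :
    Xl kn rev (i+1) = Xl kn rev i ++ [cval kn rev i] := by
  simp [Xl, List.range_succ]

theorem Xl_drop (kn : Nat) (rev : List Int) {a i : Nat} (h : a ≤ i) :
    (Xl kn rev i).drop a = (List.range (i - a)).map (fun t => cval kn rev (a + t)) := by
  apply List.ext_getElem
  · simp [Xl]
  · intro t h1 h2
    rw [List.getElem_drop]
    rw [Xl_getElem kn rev (by simp [Xl_length] at h1 ⊢; omega)]
    simp
    

theorem mem_Xl (kn : Nat) (rev : List Int) {i q : Nat} (h : q < i) :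
    cval kn rev q ∈ Xl kn rev i := by
  exact List.mem_map.2 ⟨q, List.mem_range.2 h, rfl⟩

theorem mem_Xl_iff (kn : Nat) (rev : List Int) {i : Nat} {m : Int} :
    m ∈ Xl kn rev i ↔ ∃ q, q < i ∧ cval kn rev q = m := by
  constructor
  · intro hm
    obtain ⟨q, hq, he⟩ := List.mem_map.1 hm
    exact ⟨q, List.mem_range.1 hq, he⟩
  · rintro ⟨q, hq, he⟩
    exact List.mem_map.2 ⟨q, List.mem_range.2 hq, he⟩

-- the windowed segment of the canonical list
theorem seg_eq_window (kn : Nat) (rev : List Int) {i : Nat} (h : kn + 1 ≤ i) :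
    PySem.List.slice (Xl kn rev i) (some ((i:Int) - ((kn:Int) + 1))) (some ((i:Int) + 1)) =
      (List.range (kn+1)).map (fun t => cval kn rev (i - 1 - kn + t)) := by
  have e1 : (i:Int) - ((kn:Int) + 1) = ((i - (kn+1) : Nat) : Int) := by omega
  have e2 : (i:Int) + 1 = ((i + 1 : Nat) : Int) := by omega
  rw [e1, e2, PySem.List.slice_natCast, Xl_drop kn rev (by omega)]
  rw [List.take_of_length_le (by simp; omega)]
  have e3 : i - (i - (kn+1)) = kn + 1 := by omega
  rw [e3]
  congr 1; funext t; congr 1; omega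

theorem min_window (kn : Nat) (rev : List Int) {i : Nat} (h : kn + 1 ≤ i) :
    (PySem.List.min? ((List.range (kn+1)).map (fun t => cval kn rev (i - 1 - kn + t))) (fun y => y)).getD 0
      = wmin kn rev i := by
  set L := (List.range (kn+1)).map (fun t => cval kn rev (i - 1 - kn + t)) with hL
  have hne : L ≠ [] := by simp [hL]
  obtain ⟨m, hm⟩ : ∃ m, PySem.List.min? L (fun y => y) = some m := by
    rcases he : PySem.List.min? L (fun y => y) with _ | m
    · exact absurd ((PySem.List.min?_eq_none_iff _ _).1 he) hne
    · exact ⟨m, rfl⟩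
  rw [hm, Option.getD_some]
  apply wmin_unique (by omega)
  · intro j hj1 hj2
    have hmem : cval kn rev j ∈ L := by
      refine List.mem_map.2 ⟨j - (i - 1 - kn), List.mem_range.2 (by omega), ?_⟩
      congr 1; omega
    exact PySem.List.min?_isMin hm _ hmem
  · obtain ⟨t, ht, he⟩ := List.mem_map.1 (PySem.List.min?_mem hm)
    have ht' := List.mem_range.1 ht
    exact ⟨i - 1 - kn + t, by omega, by omega, he.symm⟩

-- index? into the canonical list yields a witness position
theorem index_Xl (kn : Nat) (rev : List Int) {i : Nat} {m : Int} (hm : m ∈ Xl kn rev i) :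
    ∃ n : Nat, ((PySem.List.index? (Xl kn rev i) m).getD 0 : Int) = (n : Int) ∧ n < i ∧ cval kn rev n = m := by
  obtain ⟨n, hn⟩ : ∃ n, PySem.List.index? (Xl kn rev i) m = some n := by
    rcases he : PySem.List.index? (Xl kn rev i) m with _ | n
    · rw [PySem.List.index?_eq_none_iff] at he; exact absurd hm he
    · exact ⟨n, rfl⟩
  obtain ⟨hk, he, -⟩ := PySem.List.getElem_of_index?_eq_some hn
  refine ⟨n, by rw [hn]; rfl, by simpa [Xl_length] using hk, ?_⟩
  rw [← he, Xl_getElem kn rev (by simpa [Xl_length] using hk)]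

-- A's loop body, verbatim
def stepA (k : Int) (revenue : List Int) (st : List Int × Int × Int) (i : Int) : List Int × Int × Int :=
  let x := st.1
  let mv := st.2.1
  let mi := st.2.2
  let mv' := if i - mi ≥ k then
      (PySem.List.min? (PySem.List.slice x (some (i - (k + 1))) (some (i + 1))) (fun y => y)).getD 0
    else mv
  let mi' : Int := if i - mi ≥ k then ((PySem.List.index? x mv').getD 0 : Int) else mi
  let x' := x ++ [mv' + (PySem.List.pyGet? revenue i).getD 0]
  let xi := (PySem.List.pyGet? x' i).getD 0
  if xi < mv' then (x', xi, i) else (x', mv', mi')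

def InvA (kn : Nat) (rev : List Int) (i : Nat) (st : List Int × Int × Int) : Prop :=
  st.1 = Xl kn rev i ∧
  (∃ mi : Nat, st.2.2 = (mi : Int) ∧ mi < i ∧ cval kn rev mi = st.2.1) ∧
  (∃ p : Nat, p + (kn+1) ≤ i ∧ ∀ j, p ≤ j → j < i → st.2.1 ≤ cval kn rev j)

theorem pyGet_rev (rev : List Int) (i : Nat) :
    (PySem.List.pyGet? rev (i : Int)).getD 0 = rev.getD i 0 := by
  rw [PySem.List.pyGet?_natCast, List.getD_eq_getElem?_getD]

theorem pyGet_append (l : List Int) (w : Int) {i : Nat} (hl : l.length = i) :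
    (PySem.List.pyGet? (l ++ [w]) (i : Int)).getD 0 = w := by
  subst hl
  rw [show ((l.length : Nat) : Int) = (l.length : Int) by rfl, PySem.List.pyGet?_append_length]
  rfl

theorem stepA_inv (kn : Nat) (rev : List Int) (i : Nat) (st : List Int × Int × Int)
    (h1 : kn + 1 ≤ i) (h2 : i < rev.length) (hI : InvA kn rev i st) :
    InvA kn rev (i+1) (stepA (kn : Int) rev st (i : Int)) := by
  obtain ⟨x, mv, mi⟩ := st
  obtain ⟨hx, ⟨miN, hmi, hmiN, hmic⟩, ⟨p, hp, hpb⟩⟩ := hI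
  simp only at hx hmi hmic hpb
  subst hx hmi
  -- the branch value equals the window minimum, with a witness position and a lower-bound range
  have main : ∀ (mv' mi' : Int),
      mv' = wmin kn rev i →
      (∃ n : Nat, mi' = (n : Int) ∧ n < i ∧ cval kn rev n = mv') →
      (∃ p' : Nat, p' + (kn+1) ≤ i ∧ ∀ j, p' ≤ j → j < i → mv' ≤ cval kn rev j) →
      InvA kn rev (i+1)
        (if (PySem.List.pyGet? (Xl kn rev i ++ [mv' + (PySem.List.pyGet? rev (i:Int)).getD 0]) (i:Int)).getD 0 < mv' then
          (Xl kn rev i ++ [mv' + (PySem.List.pyGet? rev (i:Int)).getD 0],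
           (PySem.List.pyGet? (Xl kn rev i ++ [mv' + (PySem.List.pyGet? rev (i:Int)).getD 0]) (i:Int)).getD 0, (i:Int))
        else (Xl kn rev i ++ [mv' + (PySem.List.pyGet? rev (i:Int)).getD 0], mv', mi')) := by
    intro mv' mi' hmv' hw hlb
    have happ : Xl kn rev i ++ [mv' + (PySem.List.pyGet? rev (i:Int)).getD 0] = Xl kn rev (i+1) := by
      rw [Xl_succ, pyGet_rev, hmv', cval_of_gt (by omega)]
    have hxi : (PySem.List.pyGet? (Xl kn rev i ++ [mv' + (PySem.List.pyGet? rev (i:Int)).getD 0]) (i:Int)).getD 0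
        = cval kn rev i := by
      rw [happ, Xl_succ, pyGet_append _ _ (Xl_length kn rev i)]
    obtain ⟨p', hp', hpb'⟩ := hlb
    rw [hxi]
    by_cases hlt : cval kn rev i < mv'
    · rw [if_pos hlt]
      refine ⟨by simpa using happ, ⟨i, rfl, by omega, rfl⟩, ⟨p', by omega, ?_⟩⟩
      intro j hj1 hj2
      rcases Nat.lt_or_ge j i with hji | hji
      · exact le_of_lt (lt_of_lt_of_le hlt (hpb' j hj1 hji))
      · have : j = i := by omega
        subst this; rfl
    · rw [if_neg hlt]
      obtain ⟨n, hn1, hn2, hn3⟩ := hw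
      refine ⟨by simpa using happ, ⟨n, hn1, by omega, hn3⟩, ⟨p', by omega, ?_⟩⟩
      intro j hj1 hj2
      rcases Nat.lt_or_ge j i with hji | hji
      · exact hpb' j hj1 hji
      · have : j = i := by omega
        subst this
        exact not_lt.1 hlt
  by_cases hbr : (i : Int) - (miN : Int) ≥ (kn : Int)
  · -- recompute branch
    have hmv' : (PySem.List.min? (PySem.List.slice (Xl kn rev i) (some ((i:Int) - ((kn:Int) + 1))) (some ((i:Int) + 1))) (fun y => y)).getD 0
        = wmin kn rev i := by
      rw [seg_eq_window kn rev h1, min_window kn rev h1]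
    have hmem : wmin kn rev i ∈ Xl kn rev i := by
      obtain ⟨q, hq1, hq2, hq3⟩ := wmin_attained (kn := kn) (rev := rev) (i := i) (by omega)
      exact (mem_Xl_iff kn rev).2 ⟨q, hq2, hq3.symm⟩
    obtain ⟨n, hn1, hn2, hn3⟩ := index_Xl kn rev hmem
    have := main (wmin kn rev i)
      (((PySem.List.index? (Xl kn rev i) (wmin kn rev i)).getD 0 : Nat) : Int) rfl
      (⟨n, hn1, hn2, hn3⟩)
      (⟨i - 1 - kn, by omega, fun j hj1 hj2 => wmin_le (by omega) hj1 hj2⟩)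
    simpa only [stepA, if_pos hbr, hmv'] using this
  · -- lazy branch: the cached minimum is still the window minimum
    have hwin : mv = wmin kn rev i := by
      apply wmin_unique (by omega)
      · intro j hj1 hj2
        exact hpb j (by omega) hj2
      · exact ⟨miN, by omega, hmiN, hmic.symm⟩
    have := main mv (miN : Int) hwin ⟨miN, rfl, hmiN, hmic⟩ ⟨p, hp, hpb⟩
    simpa only [stepA, if_neg hbr] using this

-- generic loop invariant over range(a, a+n)
theorem foldl_inv {σ : Type} (step : σ → Int → σ) (Inv : Nat → σ → Prop) (a b : Nat)
    (hstep : ∀ (i : Nat) (st : σ), a ≤ i → i < b → Inv i st → Inv (i+1) (step st (i : Int))) :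
    ∀ (n : Nat) (st : σ), a + n ≤ b → Inv a st →
      Inv (a+n) ((PySem.List.pyRange (a : Int) ((a + n : Nat) : Int) 1).foldl step st) := by
  intro n
  induction n with
  | zero =>
    intro st _ h0
    rw [PySem.List.pyRange_one_eq_nil (by omega)]
    simpa using h0
  | succ n ih =>
    intro st hb h0
    have e1 : ((a + (n+1) : Nat) : Int) = ((a + n : Nat) : Int) + 1 := by push_cast; ring
    rw [e1, PySem.List.pyRange_one_succ_right (by omega), List.foldl_append]
    have := hstep (a+n) _ (by omega) (by omega) (ih st (by omega) h0)
    simpa using this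

theorem x0_eq (kn : Nat) (rev : List Int) (h : kn + 1 ≤ rev.length) :
    PySem.List.slice rev none (some ((kn : Int) + 1)) = Xl kn rev (kn+1) := by
  rw [show (kn : Int) + 1 = ((kn + 1 : Nat) : Int) by push_cast; ring, PySem.List.slice_to_natCast]
  apply List.ext_getElem
  · simp [Xl_length]; omega
  · intro j hj1 hj2
    rw [List.getElem_take, Xl_getElem kn rev (by simpa [Xl_length] using hj2)]
    rw [cval_of_le (by simp [Xl_length] at hj2; omega)]
    rw [List.getD_eq_getElem?_getD, List.getElem?_eq_getElem (by simp at hj1; omega)]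
    rfl

theorem baseA (kn : Nat) (rev : List Int) (h : kn + 1 ≤ rev.length) :
    InvA kn rev (kn+1)
      (PySem.List.slice rev none (some ((kn : Int) + 1)),
       (PySem.List.min? (PySem.List.slice rev none (some ((kn : Int) + 1))) (fun y => y)).getD 0,
       (((PySem.List.index? (PySem.List.slice rev none (some ((kn : Int) + 1)))
          ((PySem.List.min? (PySem.List.slice rev none (some ((kn : Int) + 1))) (fun y => y)).getD 0)).getD 0 : Nat) : Int)) := by
  rw [x0_eq kn rev h]
  have hne : Xl kn rev (kn+1) ≠ [] := by
    intro he
    have := Xl_length kn rev (kn+1)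
    rw [he] at this
    simp at this
  obtain ⟨m, hm⟩ : ∃ m, PySem.List.min? (Xl kn rev (kn+1)) (fun y => y) = some m := by
    rcases he : PySem.List.min? (Xl kn rev (kn+1)) (fun y => y) with _ | m
    · exact absurd ((PySem.List.min?_eq_none_iff _ _).1 he) hne
    · exact ⟨m, rfl⟩
  rw [hm]
  obtain ⟨n, hn1, hn2, hn3⟩ := index_Xl kn rev (PySem.List.min?_mem hm)
  refine ⟨rfl, ⟨n, by simpa using hn1, hn2, by simpa using hn3⟩, ⟨0, by omega, ?_⟩⟩
  intro j _ hj2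
  exact PySem.List.min?_isMin hm _ (mem_Xl kn rev hj2)

def initA (k : Int) (revenue : List Int) : List Int × Int × Int :=
  (PySem.List.slice revenue none (some (k + 1)),
   (PySem.List.min? (PySem.List.slice revenue none (some (k + 1))) (fun y => y)).getD 0,
   (((PySem.List.index? (PySem.List.slice revenue none (some (k + 1)))
      ((PySem.List.min? (PySem.List.slice revenue none (some (k + 1))) (fun y => y)).getD 0)).getD 0 : Nat) : Int))

theorem xA_final (kn : Nat) (rev : List Int) (h : kn + 1 ≤ rev.length) :
    ((PySem.List.pyRange ((kn : Int) + 1) ((rev.length : Nat) : Int) 1).foldl (stepA (kn : Int) rev)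
      (initA (kn : Int) rev)).1 = Xl kn rev rev.length := by
  have e1 : ((kn : Int) + 1) = (((kn + 1 : Nat)) : Int) := by push_cast; ring
  have e2 : ((rev.length : Nat) : Int) = (((kn + 1) + (rev.length - (kn+1)) : Nat) : Int) := by
    push_cast; omega
  rw [e1]
  have := foldl_inv (stepA (kn : Int) rev) (InvA kn rev) (kn+1) rev.length
    (fun i st hi1 hi2 hI => stepA_inv kn rev i st hi1 hi2 hI)
    (rev.length - (kn+1)) (initA (kn : Int) rev) (by omega) (baseA kn rev h)
  rw [← e2] at this
  have e3 : kn + 1 + (rev.length - (kn + 1)) = rev.length := by omega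
  rw [e3] at this
  exact this.1


theorem billboards_eq (k : Int) (rev : List Int) (h : ¬ k = (rev.length : Int)) :
    billboards k rev = rev.sum -
      (PySem.List.min? (PySem.List.slice
        ((PySem.List.pyRange (k + 1) ((rev.length : Nat) : Int) 1).foldl (stepA k rev) (initA k rev)).1
        (some (((rev.length : Nat) : Int) - (k + 1))) none) (fun y => y)).getD 0 := by
  simp only [billboards, initA]
  rw [if_neg h]
  rfl

-- B's loop body, verbatim
def stepB (k : Int) (revenue : List Int) (st : List Int × List Int) (i : Int) : List Int × List Int :=
  let x := st.1
  let dq := st.2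
  let vdq : Int × List Int :=
    if i ≤ k then ((PySem.List.pyGet? revenue i).getD 0, dq)
    else
      let dq := dq.dropWhile (fun j => decide (j < i - (k + 1)))
      ((PySem.List.pyGet? x (dq.headD 0)).getD 0 + (PySem.List.pyGet? revenue i).getD 0, dq)
  let v := vdq.1
  let dq := (vdq.2.reverse.dropWhile (fun j => decide ((PySem.List.pyGet? x j).getD 0 ≥ v))).reverse
  (x ++ [v], dq ++ [i])

def InvB (kn : Nat) (rev : List Int) (i : Nat) (st : List Int × List Int) : Prop :=
  st.1 = Xl kn rev i ∧
  ∃ d : List Nat, st.2 = d.map (fun n : Nat => (n : Int)) ∧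
    d.Pairwise (· < ·) ∧
    d.Pairwise (fun a b => cval kn rev a < cval kn rev b) ∧
    (∀ a ∈ d, a < i) ∧
    (0 < i → (i-1) ∈ d) ∧
    (∀ j : Nat, j < i → i ≤ j + kn + 1 → ∃ a ∈ d, j ≤ a ∧ cval kn rev a ≤ cval kn rev j)

theorem dropWhile_congr_mem {α : Type} {p q : α → Bool} :
    ∀ {l : List α}, (∀ x ∈ l, p x = q x) → l.dropWhile p = l.dropWhile q := by
  intro l
  induction l with
  | nil => intro _; rfl
  | cons a t ih =>
    intro h
    simp only [List.dropWhile_cons]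
    rw [h a (by simp)]
    split
    · exact ih (fun x hx => h x (by simp [hx]))
    · rfl

theorem mem_dropWhile_sorted {thr : Nat} :
    ∀ {l : List Nat}, l.Pairwise (· < ·) →
      ∀ a ∈ l.dropWhile (fun n => decide (n < thr)), thr ≤ a := by
  intro l
  induction l with
  | nil => intro _ a ha; simp at ha
  | cons h t ih =>
    intro hp a ha
    rw [List.dropWhile_cons] at ha
    by_cases hh : h < thr
    · rw [if_pos (by simpa using hh)] at ha
      exact ih (List.Pairwise.sublist (List.sublist_cons_self h t) hp) a ha
    · rw [if_neg (by simpa using hh)] at ha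
      rcases List.mem_cons.1 ha with rfl | hat
      · omega
      · have := List.rel_of_pairwise_cons hp hat
        omega

theorem mem_dropWhile_of_ge {thr : Nat} :
    ∀ {l : List Nat} {a : Nat}, a ∈ l → thr ≤ a →
      a ∈ l.dropWhile (fun n => decide (n < thr)) := by
  intro l
  induction l with
  | nil => intro a ha; simp at ha
  | cons h t ih =>
    intro a ha hge
    rw [List.dropWhile_cons]
    by_cases hh : h < thr
    · rw [if_pos (by simpa using hh)]
      rcases List.mem_cons.1 ha with rfl | hat
      · omega
      · exact ih hat hge
    · rw [if_neg (by simpa using hh)]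
      exact ha

theorem dropWhile_rev_lt (c : Nat → Int) (v : Int) :
    ∀ {l : List Nat}, l.Pairwise (fun a b => c b < c a) →
      ∀ a ∈ l.dropWhile (fun n => decide (v ≤ c n)), c a < v := by
  intro l
  induction l with
  | nil => intro _ a ha; simp at ha
  | cons h t ih =>
    intro hp a ha
    rw [List.dropWhile_cons] at ha
    by_cases hh : v ≤ c h
    · rw [if_pos (by simpa using hh)] at ha
      exact ih (List.Pairwise.sublist (List.sublist_cons_self h t) hp) a ha
    · rw [if_neg (by simpa using hh)] at ha
      rcases List.mem_cons.1 ha with rfl | hat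
      · omega
      · have := List.rel_of_pairwise_cons hp hat
        omega

theorem popBack_sublist {α : Type} (l : List α) (p : α → Bool) :
    List.Sublist ((l.reverse.dropWhile p).reverse) l := by
  have h1 : List.Sublist (l.reverse.dropWhile p) l.reverse := (List.dropWhile_suffix p).sublist
  simpa using h1.reverse

theorem popBack_split {α : Type} (l : List α) (p : α → Bool) :
    l = (l.reverse.dropWhile p).reverse ++ (l.reverse.takeWhile p).reverse := by
  have h := List.takeWhile_append_dropWhile (p := p) (l := l.reverse)
  calc l = l.reverse.reverse := by simp
    _ = (l.reverse.takeWhile p ++ l.reverse.dropWhile p).reverse := by rw [h]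
    _ = _ := by rw [List.reverse_append]

theorem popBack_dropped {α : Type} {l : List α} {p : α → Bool} {a : α}
    (ha : a ∈ l) (hnot : a ∉ (l.reverse.dropWhile p).reverse) : p a = true := by
  have := popBack_split l p
  rw [this] at ha
  rcases List.mem_append.1 ha with h1 | h2
  · exact absurd h1 hnot
  · exact List.mem_takeWhile_imp (List.mem_reverse.1 h2)

theorem pyGet_Xl (kn : Nat) (rev : List Int) {i n : Nat} (h : n < i) :
    (PySem.List.pyGet? (Xl kn rev i) (n : Int)).getD 0 = cval kn rev n := by
  rw [PySem.List.pyGet?_natCast,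
    List.getElem?_eq_getElem (by simp [Xl_length]; omega)]
  rw [Option.getD_some, Xl_getElem kn rev h]

theorem stepB_inv (kn : Nat) (rev : List Int) (i : Nat) (st : List Int × List Int)
    (h2 : i < rev.length) (hI : InvB kn rev i st) :
    InvB kn rev (i+1) (stepB (kn : Int) rev st (i : Int)) := by
  obtain ⟨x, dqI⟩ := st
  obtain ⟨hx, d, hd, hsort, hvals, hbnd, hlast, hcov⟩ := hI
  simp only at hx hd
  subst hx hd
  have main : ∀ (d1 : List Nat),
      d1.Pairwise (· < ·) →
      d1.Pairwise (fun a b => cval kn rev a < cval kn rev b) →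
      (∀ a ∈ d1, a < i) →
      (∀ j : Nat, j < i → i + 1 ≤ j + kn + 1 → ∃ a ∈ d1, j ≤ a ∧ cval kn rev a ≤ cval kn rev j) →
      InvB kn rev (i+1)
        (Xl kn rev i ++ [cval kn rev i],
         ((d1.map (fun n : Nat => (n : Int))).reverse.dropWhile
             (fun j => decide ((PySem.List.pyGet? (Xl kn rev i) j).getD 0 ≥ cval kn rev i))).reverse ++ [(i : Int)]) := by
    intro d1 hs1 hv1 hb1 hcov1
    have hmapdrop : ((d1.map (fun n : Nat => (n : Int))).reverse.dropWhile
        (fun j => decide ((PySem.List.pyGet? (Xl kn rev i) j).getD 0 ≥ cval kn rev i))).reverse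
        = ((d1.reverse.dropWhile (fun n => decide (cval kn rev i ≤ cval kn rev n))).reverse).map
            (fun n : Nat => (n : Int)) := by
      rw [← List.map_reverse, List.dropWhile_map]
      have hpq : ∀ n ∈ d1.reverse,
          ((fun j => decide ((PySem.List.pyGet? (Xl kn rev i) j).getD 0 ≥ cval kn rev i)) ∘
            (fun n : Nat => (n : Int))) n = (fun n : Nat => decide (cval kn rev i ≤ cval kn rev n)) n := by
        intro n hn
        show decide ((PySem.List.pyGet? (Xl kn rev i) ((n : Nat) : Int)).getD 0 ≥ cval kn rev i) = _
        rw [pyGet_Xl kn rev (hb1 n (List.mem_reverse.1 hn))]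
      rw [dropWhile_congr_mem hpq, List.map_reverse]
    set d2 := (d1.reverse.dropWhile (fun n => decide (cval kn rev i ≤ cval kn rev n))).reverse with hd2
    have hsub : List.Sublist d2 d1 := popBack_sublist d1 _
    have hs2 : d2.Pairwise (· < ·) := hs1.sublist hsub
    have hv2 : d2.Pairwise (fun a b => cval kn rev a < cval kn rev b) := hv1.sublist hsub
    have hb2 : ∀ a ∈ d2, a < i := fun a ha => hb1 a (hsub.subset ha)
    have hkept : ∀ a ∈ d2, cval kn rev a < cval kn rev i := by
      intro a ha
      exact dropWhile_rev_lt (cval kn rev) (cval kn rev i)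
        (List.pairwise_reverse.2 hv1) a (List.mem_reverse.1 (hd2 ▸ ha))
    have hdropped : ∀ a ∈ d1, a ∉ d2 → cval kn rev i ≤ cval kn rev a := by
      intro a ha hna
      simpa using popBack_dropped ha hna
    refine ⟨by rw [Xl_succ], d2 ++ [i], ?_, ?_, ?_, ?_, ?_, ?_⟩
    · simp [hmapdrop]
    · rw [List.pairwise_append]
      exact ⟨hs2, by simp, fun a ha b hb => by simp at hb; subst hb; exact hb2 a ha⟩
    · rw [List.pairwise_append]
      exact ⟨hv2, by simp, fun a ha b hb => by simp at hb; subst hb; exact hkept a ha⟩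
    · intro a ha
      rcases List.mem_append.1 ha with h1 | h1
      · have := hb2 a h1; omega
      · simp at h1; omega
    · intro _; simp
    · intro j hj hj2
      rcases Nat.lt_or_ge j i with hji | hji
      · obtain ⟨a, ha, hja, hca⟩ := hcov1 j hji (by omega)
        by_cases had2 : a ∈ d2
        · exact ⟨a, List.mem_append.2 (Or.inl had2), hja, hca⟩
        · exact ⟨i, by simp, by omega, le_trans (hdropped a ha had2) hca⟩
      · have hji' : j = i := by omega
        exact ⟨i, by simp, by omega, le_of_eq (by rw [hji'])⟩
  by_cases hik : (i : Int) ≤ (kn : Int)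
  · -- keep-everything phase: v = revenue[i]
    have hle : i ≤ kn := by exact_mod_cast hik
    have hvi : (PySem.List.pyGet? rev (i : Int)).getD 0 = cval kn rev i := by
      rw [pyGet_rev, cval_of_le hle]
    have := main d hsort hvals hbnd (fun j hj hj2 => hcov j hj (by omega))
    simpa only [stepB, if_pos hik, hvi] using this
  · -- sliding phase: pop the front, read the window minimum at the head
    have hikn : kn < i := by omega
    have hfront : (d.map (fun n : Nat => (n : Int))).dropWhile
        (fun j => decide (j < (i : Int) - ((kn : Int) + 1)))
        = (d.dropWhile (fun n => decide (n < i - (kn + 1)))).map (fun n : Nat => (n : Int)) := by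
      rw [List.dropWhile_map]
      congr 1
      apply dropWhile_congr_mem
      intro n _
      show decide ((n : Int) < (i : Int) - ((kn : Int) + 1)) = decide (n < i - (kn + 1))
      exact decide_eq_decide.2 (by omega)
    set d1 := d.dropWhile (fun n => decide (n < i - (kn + 1))) with hd1def
    have hd1mem : ∀ a ∈ d1, a ∈ d := fun a ha => (List.dropWhile_suffix _).sublist.subset ha
    have hs1 : d1.Pairwise (· < ·) := hsort.sublist (List.dropWhile_suffix _).sublist
    have hv1 : d1.Pairwise (fun a b => cval kn rev a < cval kn rev b) :=
      hvals.sublist (List.dropWhile_suffix _).sublist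
    have hb1 : ∀ a ∈ d1, a < i := fun a ha => hbnd a (hd1mem a ha)
    have hthr : ∀ a ∈ d1, i - (kn+1) ≤ a := fun a ha => mem_dropWhile_sorted hsort a ha
    have hne : d1 ≠ [] := by
      intro he
      have hm : (i-1) ∈ d1 := mem_dropWhile_of_ge (hlast (by omega)) (by omega)
      rw [he] at hm
      simp at hm
    obtain ⟨h0, t0, hd1⟩ := List.ne_nil_iff_exists_cons.mp hne
    have hh0d1 : h0 ∈ d1 := by rw [hd1]; simp
    have hmin : ∀ a ∈ d1, cval kn rev h0 ≤ cval kn rev a := by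
      intro a ha
      rw [hd1] at ha hv1
      rcases List.mem_cons.1 ha with rfl | hat
      · exact le_refl _
      · exact le_of_lt (List.rel_of_pairwise_cons hv1 hat)
    have hwl : cval kn rev h0 = wmin kn rev i := by
      apply wmin_unique hikn
      · intro j hj1 hj2
        obtain ⟨a, ha, hja, hca⟩ := hcov j hj2 (by omega)
        have ha1 : a ∈ d1 := mem_dropWhile_of_ge ha (by omega)
        exact le_trans (hmin a ha1) hca
      · exact ⟨h0, by have := hthr h0 hh0d1; omega, hb1 h0 hh0d1, rfl⟩
    have hhead : (d1.map (fun n : Nat => (n : Int))).headD 0 = (h0 : Int) := by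
      rw [hd1]; rfl
    have hv : (PySem.List.pyGet? (Xl kn rev i) ((d1.map (fun n : Nat => (n : Int))).headD 0)).getD 0
        + (PySem.List.pyGet? rev (i : Int)).getD 0 = cval kn rev i := by
      rw [hhead, pyGet_Xl kn rev (hb1 h0 hh0d1), pyGet_rev, hwl, ← cval_of_gt hikn]
    have hcov1 : ∀ j : Nat, j < i → i + 1 ≤ j + kn + 1 → ∃ a ∈ d1, j ≤ a ∧ cval kn rev a ≤ cval kn rev j := by
      intro j hj hj2
      obtain ⟨a, ha, hja, hca⟩ := hcov j hj (by omega)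
      exact ⟨a, mem_dropWhile_of_ge ha (by omega), hja, hca⟩
    have := main d1 hs1 hv1 hb1 hcov1
    simpa only [stepB, if_neg hik, hfront, hv] using this


theorem billboards_alt_eq (k : Int) (rev : List Int) (h : ¬ k = (rev.length : Int)) :
    billboards_alt k rev = rev.sum -
      (PySem.List.min? (PySem.List.slice
        ((PySem.List.pyRange 0 ((rev.length : Nat) : Int) 1).foldl (stepB k rev) ([], [])).1
        (some (((rev.length : Nat) : Int) - (k + 1))) none) (fun y => y)).getD 0 := by
  simp only [billboards_alt]
  rw [if_neg h]
  rfl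

theorem xB_final (kn : Nat) (rev : List Int) :
    ((PySem.List.pyRange 0 ((rev.length : Nat) : Int) 1).foldl (stepB (kn : Int) rev) ([], [])).1
      = Xl kn rev rev.length := by
  have hbase : InvB kn rev 0 ([], []) := by
    refine ⟨by simp [Xl], [], rfl, by simp, by simp, by simp, by simp, by simp⟩
  have := foldl_inv (stepB (kn : Int) rev) (InvB kn rev) 0 rev.length
    (fun i st _ hi2 hI => stepB_inv kn rev i st hi2 hI)
    rev.length ([], []) (by omega) hbase
  simpa using this.1

theorem Xl_eq_rev (kn : Nat) (rev : List Int) (h : rev.length ≤ kn + 1) :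
    Xl kn rev rev.length = rev := by
  apply List.ext_getElem
  · simp [Xl_length]
  · intro j hj1 hj2
    rw [Xl_getElem kn rev (by simpa [Xl_length] using hj1), cval_of_le (by simp [Xl_length] at hj1; omega)]
    rw [List.getD_eq_getElem?_getD, List.getElem?_eq_getElem hj2]
    rfl

theorem xA_final_big (kn : Nat) (rev : List Int) (h : rev.length < kn + 1) :
    ((PySem.List.pyRange ((kn : Int) + 1) ((rev.length : Nat) : Int) 1).foldl (stepA (kn : Int) rev)
      (initA (kn : Int) rev)).1 = rev := by
  rw [PySem.List.pyRange_one_eq_nil (by omega)]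
  simp only [List.foldl_nil, initA]
  rw [show (kn : Int) + 1 = ((kn + 1 : Nat) : Int) by push_cast; ring, PySem.List.slice_to_natCast]
  exact List.take_of_length_le (by omega)

theorem ports_agree (k : Int) (rev : List Int) (hk : 0 ≤ k) :
    billboards k rev = billboards_alt k rev := by
  by_cases hN : k = (rev.length : Int)
  · simp only [billboards, billboards_alt, if_pos hN]
  · rw [billboards_eq k rev hN, billboards_alt_eq k rev hN]
    have hkk : ((k.toNat : Nat) : Int) = k := Int.toNat_of_nonneg hk
    rw [← hkk]
    rcases Nat.lt_or_ge k.toNat rev.length with hlt | hge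
    · rw [xA_final k.toNat rev (by omega), xB_final k.toNat rev]
    · rw [xA_final_big k.toNat rev (by omega), xB_final k.toNat rev,
        Xl_eq_rev k.toNat rev (by omega)]


-- ===== VERDICT (by name: the statement is the Claim_ definition above) =====
theorem billboards_spec : Claim_equal_billboards := by
  intro k revenue _ hPre
  exact ports_agree k revenue hPre.1
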